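-- pv_equiv track=rewrite | github.com/Million-mo/stunning-octo-chainsaw | src/arkts_processor/symbol_service/index_service.py | _fuzzy_match
-- ===== SOURCE A (Python) =====
-- def _fuzzy_match(pattern: str, text: str) -> bool:
--     """
--     模糊匹配
--
--     Args:
--         pattern: 模式
--         text: 文本
--
--     Returns:
--         是否匹配
--     """
--     pattern_idx = 0
--     text_idx = 0
--
--     while pattern_idx < len(pattern) and text_idx < len(text):
--         if pattern[pattern_idx] == text[text_idx]:
--             pattern_idx += 1
--         text_idx += 1
--
--     return pattern_idx == len(pattern)
-- ===== SOURCE B (Python) =====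
-- def _fuzzy_match(pattern: str, text: str) -> bool:
--     # Build a char -> sorted occurrence-positions index of text once,
--     # then greedily pick, for each pattern char, its first occurrence at or
--     # after the current frontier; no scan over text during matching.
--     index = {}
--     for i, ch in enumerate(text):
--         index.setdefault(ch, []).append(i)
--     pos = 0
--     for ch in pattern:
--         nxt = None
--         for p in index.get(ch, []):
--             if p >= pos:
--                 nxt = p
--                 break
--         if nxt is None:
--             return False
--         pos = nxt + 1
--     return True
-- ===== Notes on version B (the rewrite author's own statement) =====
-- stated objective: alternative
-- what changed: Replaces A's two-pointer scan over text with a precomputed char-to-occurrence-positions index of text, then matches each pattern char by taking the first indexed occurrence at or after the current frontier; the matching phase never scans text itself.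
import Mathlib
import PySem

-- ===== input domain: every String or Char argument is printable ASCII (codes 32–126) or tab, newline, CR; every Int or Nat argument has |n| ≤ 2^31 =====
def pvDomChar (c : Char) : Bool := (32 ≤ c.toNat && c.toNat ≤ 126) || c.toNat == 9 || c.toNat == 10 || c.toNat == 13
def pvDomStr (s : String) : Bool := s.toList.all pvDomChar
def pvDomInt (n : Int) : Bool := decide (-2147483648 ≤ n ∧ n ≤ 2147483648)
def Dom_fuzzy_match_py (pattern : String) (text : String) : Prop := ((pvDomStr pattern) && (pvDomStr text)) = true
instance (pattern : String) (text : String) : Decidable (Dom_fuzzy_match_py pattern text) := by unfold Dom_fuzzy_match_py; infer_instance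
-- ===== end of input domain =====

-- B replaces A's two-pointer scan with a precomputed char→occurrence-positions index of
-- text, matching each pattern char against its own occurrence list; return values proved
-- equal on all inputs.

-- ===== PORT A =====
-- A's while loop over the two indices pattern_idx / text_idx; recursion on the
-- remaining text length, state exactly A's two counters.
def pvLoopA (p t : List Char) (pi ti : Nat) : Bool :=
  if _h : pi < p.length ∧ ti < t.length then
    pvLoopA p t (if p.getD pi ' ' = t.getD ti ' ' then pi + 1 else pi) (ti + 1)
  else
    decide (pi = p.length)
termination_by t.length - ti

def fuzzy_match_py (pattern : String) (text : String) : Bool :=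
  pvLoopA pattern.toList text.toList 0 0

-- ===== PORT B =====
-- 'for i, ch in enumerate(text): index.setdefault(ch, []).append(i)'
def pvBuildIndex (t : List Char) : PySem.Dict Char (List Int) :=
  (PySem.List.enumerate t 0).foldl (fun d p => d.modify p.2 [] (· ++ [p.1])) PySem.Dict.empty

-- inner 'for p in index.get(ch, []): if p >= pos: nxt = p; break'
def pvFirstGe (pos : Int) : List Int → Option Int
  | [] => none
  | p :: ps => if p ≥ pos then some p else pvFirstGe pos ps

-- outer 'for ch in pattern' loop threading the frontier pos; early 'return False' on none
def pvLoopB (index : PySem.Dict Char (List Int)) : List Char → Int → Bool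
  | [], _ => true
  | c :: ps, pos =>
    match pvFirstGe pos (index.getD c []) with
    | none => false
    | some p => pvLoopB index ps (p + 1)

def fuzzy_match_py_alt (pattern : String) (text : String) : Bool :=
  pvLoopB (pvBuildIndex text.toList) pattern.toList 0

-- ===== PRECONDITION & SPEC =====
def Spec_fuzzy_match_py (pattern : String) (text : String) (out : Bool) : Prop := out = fuzzy_match_py_alt pattern text
instance (pattern : String) (text : String) (out : Bool) : Decidable (Spec_fuzzy_match_py pattern text out) := by unfold Spec_fuzzy_match_py; infer_instance

-- ===== CLAIM (what is proved, stated in full; the proofs are below) =====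
def Claim_equal_fuzzy_match_py : Prop := ∀ (pattern : String) (text : String), Dom_fuzzy_match_py pattern text → Spec_fuzzy_match_py pattern text (fuzzy_match_py pattern text)

-- ===== LEMMAS AND PROOFS =====

-- Proof device: the canonical greedy subsequence check on the remaining text.
def pvConsume (c : Char) : List Char → Option (List Char)
  | [] => none
  | d :: ts => if d = c then some ts else pvConsume c ts

def pvAllIn : List Char → List Char → Bool
  | [], _ => true
  | c :: ps, ts =>
    match pvConsume c ts with
    | none => false
    | some ts' => pvAllIn ps ts'

theorem pvAllIn_skip (c : Char) (ps ts : List Char) (d : Char) (hne : ¬ d = c) :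
    pvAllIn (c :: ps) (d :: ts) = pvAllIn (c :: ps) ts := by
  simp [pvAllIn, pvConsume, hne]

-- ----- A's loop equals the canonical greedy check -----
theorem pvLoopA_eq_allIn (p t : List Char) (pi ti : Nat) (hp : pi ≤ p.length) :
    pvLoopA p t pi ti = pvAllIn (p.drop pi) (t.drop ti) := by
  fun_induction pvLoopA p t pi ti with
  | case1 pi ti h ih =>
    obtain ⟨hpl, htl⟩ := h
    have hdp : p.drop pi = p[pi] :: p.drop (pi + 1) := List.drop_eq_getElem_cons hpl
    have hdt : t.drop ti = t[ti] :: t.drop (ti + 1) := List.drop_eq_getElem_cons htl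
    have hgp : p.getD pi ' ' = p[pi] := by simp [List.getD_eq_getElem?_getD, hpl]
    have hgt : t.getD ti ' ' = t[ti] := by simp [List.getD_eq_getElem?_getD, htl]
    by_cases he : p.getD pi ' ' = t.getD ti ' '
    · rw [dif_pos he] at ih; rw [if_pos he]
      rw [ih (by omega), hdp, hdt]
      have : t[ti] = p[pi] := by rw [← hgp, ← hgt, he]
      simp [pvAllIn, pvConsume, this]
    · rw [dif_neg he] at ih; rw [if_neg he]
      rw [ih hp, hdp, hdt, pvAllIn_skip]
      rw [hgp, hgt] at he
      exact fun h' => he h'.symm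
  | case2 pi ti h =>
    by_cases hpe : pi = p.length
    · simp [hpe, pvAllIn]
    · have hpl : pi < p.length := lt_of_le_of_ne hp hpe
      have htl : ¬ ti < t.length := fun h' => h ⟨hpl, h'⟩
      have hdt : t.drop ti = [] := List.drop_eq_nil_of_le (by omega)
      have hdp : p.drop pi = p[pi] :: p.drop (pi + 1) := List.drop_eq_getElem_cons hpl
      rw [hdt, hdp]
      simp [pvAllIn, pvConsume, hpe]

-- ----- B's index equals the reference occurrence lists -----
-- reference: the positions of c in ts, counting from base
def pvIdxFrom (c : Char) : Int → List Char → List Int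
  | _, [] => []
  | base, d :: ts => if d = c then base :: pvIdxFrom c (base + 1) ts else pvIdxFrom c (base + 1) ts

theorem pvBuildIndex_getD (t : List Char) :
    ∀ (k : Int) (d : PySem.Dict Char (List Int)) (c : Char),
      ((PySem.List.enumerate t k).foldl (fun d p => d.modify p.2 [] (· ++ [p.1])) d).getD c []
        = d.getD c [] ++ pvIdxFrom c k t := by
  induction t with
  | nil => intro k d c; simp [PySem.List.enumerate_nil, pvIdxFrom]
  | cons x ts ih =>
    intro k d c
    rw [PySem.List.enumerate_cons]
    simp only [List.foldl_cons]
    rw [ih]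
    by_cases hxc : x = c
    · subst hxc
      rw [PySem.Dict.getD_modify_self]
      simp [pvIdxFrom]
    · rw [PySem.Dict.getD_modify, if_neg (fun h => hxc h.symm)]
      simp [pvIdxFrom, hxc]

-- ----- first occurrence ≥ pos in the index ↔ greedy consumption on the suffix -----
theorem pvFirstGe_idxFrom (c : Char) (t : List Char) :
    ∀ (base pos : Int),
      (pvFirstGe pos (pvIdxFrom c base t) = none →
          pvConsume c (t.drop (pos - base).toNat) = none) ∧
      (∀ p, pvFirstGe pos (pvIdxFrom c base t) = some p →
          base ≤ p ∧ pos ≤ p ∧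
          pvConsume c (t.drop (pos - base).toNat) = some (t.drop (p + 1 - base).toNat)) := by
  induction t with
  | nil =>
    intro base pos
    constructor
    · intro _; simp [pvConsume]
    · intro p hp; simp [pvIdxFrom, pvFirstGe] at hp
  | cons d ts ih =>
    intro base pos
    by_cases hdc : d = c
    · have hix : pvIdxFrom c base (d :: ts) = base :: pvIdxFrom c (base + 1) ts := by
        simp [pvIdxFrom, hdc]
      by_cases hpb : pos ≤ base
      · have h0 : (pos - base).toNat = 0 := by omega
        constructor
        · intro hn; simp [hix, pvFirstGe, hpb] at hn
        · intro p hp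
          simp [hix, pvFirstGe, hpb] at hp
          subst hp
          refine ⟨le_refl _, hpb, ?_⟩
          have h1 : (base + 1 - base).toNat = 1 := by omega
          simp [h0, pvConsume, hdc]
      · have hsk : pvFirstGe pos (pvIdxFrom c base (d :: ts)) =
            pvFirstGe pos (pvIdxFrom c (base + 1) ts) := by
          simp [hix, pvFirstGe, hpb]
        have hd : (d :: ts).drop (pos - base).toNat = ts.drop (pos - (base + 1)).toNat := by
          have : (pos - base).toNat = (pos - (base + 1)).toNat + 1 := by omega
          simp [this]
        obtain ⟨ihn, ihs⟩ := ih (base + 1) pos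
        constructor
        · intro hn; rw [hsk] at hn; rw [hd]; exact ihn hn
        · intro p hp; rw [hsk] at hp
          obtain ⟨h1, h2, h3⟩ := ihs p hp
          refine ⟨by omega, h2, ?_⟩
          rw [hd, h3]
          have : (p + 1 - base).toNat = (p + 1 - (base + 1)).toNat + 1 := by omega
          simp [this]
    · have hsk : pvIdxFrom c base (d :: ts) = pvIdxFrom c (base + 1) ts := by
        simp [pvIdxFrom, hdc]
      obtain ⟨ihn, ihs⟩ := ih (base + 1) pos
      by_cases hpb : pos ≤ base
      · have h0 : (pos - base).toNat = 0 := by omega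
        have h0' : (pos - (base + 1)).toNat = 0 := by omega
        constructor
        · intro hn; rw [hsk] at hn
          have := ihn hn
          rw [h0'] at this
          rw [h0]
          simp only [List.drop_zero] at this ⊢
          simp [pvConsume, hdc, this]
        · intro p hp; rw [hsk] at hp
          obtain ⟨h1, h2, h3⟩ := ihs p hp
          rw [h0'] at h3
          refine ⟨by omega, h2, ?_⟩
          have : (p + 1 - base).toNat = (p + 1 - (base + 1)).toNat + 1 := by omega
          rw [h0, this]
          simp only [List.drop_zero] at h3
          simp [pvConsume, hdc, h3]
      · have hd : (d :: ts).drop (pos - base).toNat = ts.drop (pos - (base + 1)).toNat := by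
          have : (pos - base).toNat = (pos - (base + 1)).toNat + 1 := by omega
          simp [this]
        constructor
        · intro hn; rw [hsk] at hn; rw [hd]; exact ihn hn
        · intro p hp; rw [hsk] at hp
          obtain ⟨h1, h2, h3⟩ := ihs p hp
          refine ⟨by omega, h2, ?_⟩
          rw [hd, h3]
          have : (p + 1 - base).toNat = (p + 1 - (base + 1)).toNat + 1 := by omega
          simp [this]

-- ----- B's loop equals the canonical greedy check -----
theorem pvLoopB_eq_allIn (t : List Char) (index : PySem.Dict Char (List Int))
    (hidx : ∀ c, index.getD c [] = pvIdxFrom c 0 t) :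
    ∀ (ps : List Char) (pos : Int), 0 ≤ pos →
      pvLoopB index ps pos = pvAllIn ps (t.drop pos.toNat) := by
  intro ps
  induction ps with
  | nil => intro pos _; simp [pvLoopB, pvAllIn]
  | cons c ps ih =>
    intro pos hpos
    obtain ⟨hn, hs⟩ := pvFirstGe_idxFrom c t 0 pos
    rw [show pos - 0 = pos by ring] at hn hs
    simp only [pvLoopB, hidx]
    cases hfe : pvFirstGe pos (pvIdxFrom c 0 t) with
    | none =>
      have := hn hfe
      simp [pvAllIn, this]
    | some p =>
      obtain ⟨h0, h1, h2⟩ := hs p hfe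
      rw [show p + 1 - 0 = p + 1 by ring] at h2
      simp only [pvAllIn, h2]
      exact ih (p + 1) (by omega)

-- ===== VERDICT (by name: the statement is the Claim_ definition above) =====
theorem fuzzy_match_py_spec : Claim_equal_fuzzy_match_py := by
  intro pattern text _
  unfold Spec_fuzzy_match_py fuzzy_match_py fuzzy_match_py_alt
  have hA := pvLoopA_eq_allIn pattern.toList text.toList 0 0 (Nat.zero_le _)
  have hB := pvLoopB_eq_allIn text.toList (pvBuildIndex text.toList)
      (fun c => by simpa using pvBuildIndex_getD text.toList 0 PySem.Dict.empty c)
      pattern.toList 0 le_rfl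
  simp only [List.drop_zero] at hA hB
  rw [hA, hB]
  norm_num
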